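-- pv_equiv track=rewrite | github.com/ashudnsingh/CodeSignal | Graphs/In the Pseudoforest/023 - isMobiusLadder.py | isMobiusLadder
-- ===== SOURCE A (Python) =====
-- from collections import defaultdict
--
-- def isMobiusLadder(n, ladder):
--     g = defaultdict(set)
--     for x,y in ladder:
--         g[x].add(y)
--         g[y].add(x)
--     if not  all(len(x) == 3 for x in g.values()) or len(g) != n:
--         return 0
--     if n == 4:
--         return 1
--     for x,y,z in g.values():
--         if x in g[y] or z in g[y] or x in g[z] or y in g[z] or y in g[x] or z in g[x]:
--             return 0
--     return 1
-- ===== SOURCE B (Python) =====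
-- def isMobiusLadder(n, ladder):
--     edges = set()
--     for x, y in ladder:
--         edges.add((x, y) if x <= y else (y, x))
--     verts = set()
--     for a, b in edges:
--         verts.add(a)
--         verts.add(b)
--     if len(verts) != n or any(sum(1 for e in edges if v in e) != 3 for v in verts):
--         return 0
--     if n == 4:
--         return 1
--     for a, b in edges:
--         for c in verts:
--             if ((a, c) if a <= c else (c, a)) in edges and ((b, c) if b <= c else (c, b)) in edges:
--                 return 0
--     return 1
-- ===== Notes on version B (the rewrite author's own statement) =====
-- stated objective: alternative
-- what changed: B never builds the adjacency-set dict: it builds a set of canonically-ordered undirected edges plus a vertex set, checks the degree-3 guard by counting incident edges per vertex, and detects triangles by testing for each edge whether some vertex is connected to both endpoints via edge-set membership, instead of A's dict of neighbour sets with a vertex-centric six-way pairwise membership test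
import Mathlib
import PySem

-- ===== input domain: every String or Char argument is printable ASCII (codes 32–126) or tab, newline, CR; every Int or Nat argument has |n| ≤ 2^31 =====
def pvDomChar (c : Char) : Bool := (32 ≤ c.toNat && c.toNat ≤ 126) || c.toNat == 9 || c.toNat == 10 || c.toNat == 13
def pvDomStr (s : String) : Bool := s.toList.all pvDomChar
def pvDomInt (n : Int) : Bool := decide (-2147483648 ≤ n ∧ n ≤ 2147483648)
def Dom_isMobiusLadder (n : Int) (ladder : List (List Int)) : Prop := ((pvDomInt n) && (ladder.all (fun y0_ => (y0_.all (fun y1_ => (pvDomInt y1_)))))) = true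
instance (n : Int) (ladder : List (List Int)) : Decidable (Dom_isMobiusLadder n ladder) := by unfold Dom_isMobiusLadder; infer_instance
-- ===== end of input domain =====

-- B never builds A's adjacency-set dict: it keeps a set of canonically-ordered edges
-- and a vertex set, checks the degree guard by counting incident edges, and finds
-- triangles by asking, per edge, whether some vertex is linked to both endpoints.

-- ===== PORT A =====
-- 'g = defaultdict(set); for x,y in ladder: g[x].add(y); g[y].add(x)'
def pvStep (g : PySem.Dict Int (PySem.Set Int)) (e : List Int) : PySem.Dict Int (PySem.Set Int) :=
  match e with
  | x :: y :: _ =>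
      (g.modify x PySem.Set.empty (fun s => PySem.Set.add s y)).modify y PySem.Set.empty
        (fun s => PySem.Set.add s x)
  | _ => g  -- unreachable under Pre_ (every edge has length 2; Python raises otherwise)

def pvBuildG (ladder : List (List Int)) : PySem.Dict Int (PySem.Set Int) :=
  ladder.foldl pvStep PySem.Dict.empty

-- 'for x,y,z in g.values(): if x in g[y] or …: return 0' — the six tests in source order
def pvLoopA (g : PySem.Dict Int (PySem.Set Int)) : List (PySem.Set Int) → Int
  | [] => 1
  | s :: rest =>
    match s with
    | [x, y, z] =>
        if (g.getD y PySem.Set.empty).contains x || (g.getD y PySem.Set.empty).contains z ||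
           (g.getD z PySem.Set.empty).contains x || (g.getD z PySem.Set.empty).contains y ||
           (g.getD x PySem.Set.empty).contains y || (g.getD x PySem.Set.empty).contains z
        then 0 else pvLoopA g rest
    | _ => 0  -- unreachable: the guard just ensured every value has exactly 3 elements

def isMobiusLadder (n : Int) (ladder : List (List Int)) : Int :=
  let g := pvBuildG ladder
  if !(g.values.all (fun s => PySem.Set.len s == 3)) || (g.size : Int) ≠ n then 0
  else if n = 4 then 1
  else pvLoopA g g.values

-- ===== PORT B =====
-- '(x, y) if x <= y else (y, x)'
def pvCanon (x y : Int) : Int × Int := if x ≤ y then (x, y) else (y, x)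

-- 'edges = set(); for x, y in ladder: edges.add((x, y) if x <= y else (y, x))'
def pvEdges (ladder : List (List Int)) : PySem.Set (Int × Int) :=
  ladder.foldl
    (fun es e =>
      match e with
      | x :: y :: _ => PySem.Set.add es (pvCanon x y)
      | _ => es)  -- unreachable under Pre_
    PySem.Set.empty

-- 'verts = set(); for a, b in edges: verts.add(a); verts.add(b)'
def pvVerts (edges : PySem.Set (Int × Int)) : PySem.Set Int :=
  edges.foldl (fun vs e => PySem.Set.add (PySem.Set.add vs e.1) e.2) PySem.Set.empty

-- 'sum(1 for e in edges if v in e)'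
def pvDeg (edges : PySem.Set (Int × Int)) (v : Int) : Int :=
  edges.foldl (fun acc e => if e.1 = v ∨ e.2 = v then acc + 1 else acc) 0

-- 'for a, b in edges: for c in verts: if canon(a,c) in edges and canon(b,c) in edges: return 0'
def pvLoopB (edges : PySem.Set (Int × Int)) (verts : PySem.Set Int) : List (Int × Int) → Int
  | [] => 1
  | (a, b) :: rest =>
      if verts.any (fun c =>
          PySem.Set.contains edges (pvCanon a c) && PySem.Set.contains edges (pvCanon b c))
      then 0 else pvLoopB edges verts rest

def isMobiusLadder_alt (n : Int) (ladder : List (List Int)) : Int :=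
  let edges := pvEdges ladder
  let verts := pvVerts edges
  if (PySem.Set.len verts : Int) ≠ n || verts.any (fun v => pvDeg edges v ≠ 3) then 0
  else if n = 4 then 1
  else pvLoopB edges verts edges

-- ===== PRECONDITION & SPEC =====
-- Pre_ excludes edges that are not 2-element lists: on those 'for x,y in ladder' raises
-- ValueError in both A and B.
def Pre_isMobiusLadder (n : Int) (ladder : List (List Int)) : Prop :=
  ∀ e ∈ ladder, e.length = 2
instance (n : Int) (ladder : List (List Int)) : Decidable (Pre_isMobiusLadder n ladder) := by
  unfold Pre_isMobiusLadder; infer_instance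

def pvWitness_isMobiusLadder : Int × List (List Int) :=
  (6, [[0,1],[1,2],[2,3],[3,4],[4,5],[5,0],[0,3],[1,4],[2,5]])

def Spec_isMobiusLadder (n : Int) (ladder : List (List Int)) (out : Int) : Prop := out = isMobiusLadder_alt n ladder
instance (n : Int) (ladder : List (List Int)) (out : Int) : Decidable (Spec_isMobiusLadder n ladder out) := by unfold Spec_isMobiusLadder; infer_instance

-- ===== CLAIM (what is proved, stated in full; the proofs are below) =====
def Claim_equal_isMobiusLadder : Prop := ∀ (n : Int) (ladder : List (List Int)), Dom_isMobiusLadder n ladder → Pre_isMobiusLadder n ladder → Spec_isMobiusLadder n ladder (isMobiusLadder n ladder)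

-- ===== LEMMAS AND PROOFS =====

-- ---------- A-side: characterisation of the adjacency dict ----------

theorem pv_getD_step (d : PySem.Dict Int (PySem.Set Int)) (x y a b : Int) :
    b ∈ (pvStep d [x, y]).getD a PySem.Set.empty ↔
      b ∈ d.getD a PySem.Set.empty ∨ (a = x ∧ b = y) ∨ (a = y ∧ b = x) := by
  unfold pvStep
  simp only [PySem.Dict.getD_modify]
  rcases eq_or_ne y x with hxy | hxy
  · subst hxy
    by_cases hay : a = y <;> simp [hay, PySem.Set.mem_add]
  · have hxy' : ¬ x = y := fun h => hxy h.symm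
    by_cases hay : a = y <;> by_cases hax : a = x <;>
      simp [hay, hax, hxy, hxy', PySem.Set.mem_add]

theorem pv_getD_foldl (l : List (List Int)) (d : PySem.Dict Int (PySem.Set Int))
    (hpre : ∀ e ∈ l, e.length = 2) (a b : Int) :
    b ∈ (l.foldl pvStep d).getD a PySem.Set.empty ↔
      b ∈ d.getD a PySem.Set.empty ∨ [a, b] ∈ l ∨ [b, a] ∈ l := by
  induction l generalizing d with
  | nil => simp
  | cons e t ih =>
    have he : e.length = 2 := hpre e (by simp)
    obtain ⟨x, y, rfl⟩ : ∃ x y, e = [x, y] := by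
      rcases e with _ | ⟨x, _ | ⟨y, _ | ⟨z, r⟩⟩⟩ <;> simp at he
      exact ⟨x, y, rfl⟩
    rw [List.foldl_cons, ih _ (fun e he' => hpre e (by simp [he']))]
    rw [pv_getD_step]
    simp only [List.mem_cons, List.cons.injEq, and_true]
    tauto

theorem pv_adj (ladder : List (List Int)) (hpre : ∀ e ∈ ladder, e.length = 2) (a b : Int) :
    b ∈ (pvBuildG ladder).getD a PySem.Set.empty ↔ [a, b] ∈ ladder ∨ [b, a] ∈ ladder := by
  unfold pvBuildG
  rw [pv_getD_foldl ladder _ hpre]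
  simp [PySem.Dict.getD_empty]

theorem pv_adj_symm (ladder : List (List Int)) (hpre : ∀ e ∈ ladder, e.length = 2) (a b : Int) :
    b ∈ (pvBuildG ladder).getD a PySem.Set.empty ↔ a ∈ (pvBuildG ladder).getD b PySem.Set.empty := by
  rw [pv_adj ladder hpre, pv_adj ladder hpre]
  tauto

theorem pv_nodup_step (d : PySem.Dict Int (PySem.Set Int))
    (h : ∀ a, (d.getD a PySem.Set.empty).Nodup) (e : List Int) (a : Int) :
    ((pvStep d e).getD a PySem.Set.empty).Nodup := by
  unfold pvStep
  rcases e with _ | ⟨x, _ | ⟨y, rest⟩⟩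
  · exact h a
  · exact h a
  · simp only [PySem.Dict.getD_modify]
    split_ifs <;> first
      | exact h a
      | exact PySem.Set.nodup_add _ _ (h _)
      | exact PySem.Set.nodup_add _ _ (PySem.Set.nodup_add _ _ (h _))

theorem pv_nodup_keys_step (d : PySem.Dict Int (PySem.Set Int)) (h : d.keys.Nodup)
    (e : List Int) : (pvStep d e).keys.Nodup := by
  unfold pvStep
  rcases e with _ | ⟨x, _ | ⟨y, rest⟩⟩
  · exact h
  · exact h
  · simp only [PySem.Dict.keys_modify]
    exact PySem.Dict.nodup_keys_insert _ _ _ (PySem.Dict.nodup_keys_insert _ _ _ h)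

theorem pv_nodup_foldl (l : List (List Int)) (d : PySem.Dict Int (PySem.Set Int))
    (h : ∀ a, (d.getD a PySem.Set.empty).Nodup) (a : Int) :
    ((l.foldl pvStep d).getD a PySem.Set.empty).Nodup := by
  induction l generalizing d with
  | nil => exact h a
  | cons e t ih => exact ih _ (pv_nodup_step d h e)

theorem pv_nodup_keys_foldl (l : List (List Int)) (d : PySem.Dict Int (PySem.Set Int))
    (h : d.keys.Nodup) : (l.foldl pvStep d).keys.Nodup := by
  induction l generalizing d with
  | nil => exact h
  | cons e t ih => exact ih _ (pv_nodup_keys_step d h e)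

theorem pv_mem_keys_of_ne_nil (g : PySem.Dict Int (PySem.Set Int)) (a : Int)
    (h : g.getD a PySem.Set.empty ≠ []) : a ∈ g.keys := by
  by_contra hk
  cases hcb : g.contains a with
  | true => exact hk ((PySem.Dict.contains_iff_mem_keys g a).mp hcb)
  | false => exact h (PySem.Dict.getD_of_not_contains g _ hcb)

-- every key of g carries a nonempty neighbour set
theorem pv_add_ne_nil {α : Type} [BEq α] [LawfulBEq α] (s : PySem.Set α) (x : α) :
    PySem.Set.add s x ≠ [] := by
  intro h
  have : x ∈ PySem.Set.add s x := (PySem.Set.mem_add s x x).mpr (Or.inr rfl)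
  rw [h] at this
  exact List.not_mem_nil this

theorem pv_getD_ne_nil_of_mem_keys (l : List (List Int)) (d : PySem.Dict Int (PySem.Set Int))
    (h : ∀ a ∈ d.keys, d.getD a PySem.Set.empty ≠ []) (a : Int)
    (ha : a ∈ (l.foldl pvStep d).keys) : (l.foldl pvStep d).getD a PySem.Set.empty ≠ [] := by
  induction l generalizing d with
  | nil => exact h a ha
  | cons e t ih =>
    rw [List.foldl_cons] at ha ⊢
    refine ih (pvStep d e) ?_ ha
    intro b hb
    rcases e with _ | ⟨x, _ | ⟨y, rest⟩⟩
    · exact h b hb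
    · exact h b hb
    · replace hb : b ∈ ((d.modify x PySem.Set.empty (fun s => PySem.Set.add s y)).modify y
          PySem.Set.empty (fun s => PySem.Set.add s x)).keys := hb
      show ((d.modify x PySem.Set.empty (fun s => PySem.Set.add s y)).modify y
          PySem.Set.empty (fun s => PySem.Set.add s x)).getD b PySem.Set.empty ≠ []
      simp only [PySem.Dict.getD_modify]
      split_ifs with h1 h2 h3
      · exact pv_add_ne_nil _ _
      · exact pv_add_ne_nil _ _
      · exact pv_add_ne_nil _ _
      · refine h b ?_
        simp only [PySem.Dict.keys_modify, PySem.Dict.mem_keys_insert] at hb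
        rcases hb with hb | hb | hb
        · exact absurd hb h1
        · exact absurd hb h3
        · exact hb

-- the six membership tests on a duplicate-free triple are exactly "some pair adjacent"
theorem pv_six_iff (g : PySem.Dict Int (PySem.Set Int)) (x y z : Int)
    (hnd : ([x, y, z] : List Int).Nodup) :
    ((g.getD y PySem.Set.empty).contains x || (g.getD y PySem.Set.empty).contains z ||
     (g.getD z PySem.Set.empty).contains x || (g.getD z PySem.Set.empty).contains y ||
     (g.getD x PySem.Set.empty).contains y || (g.getD x PySem.Set.empty).contains z) = true ↔
      ∃ p q, p ∈ ([x, y, z] : List Int) ∧ q ∈ ([x, y, z] : List Int) ∧ p ≠ q ∧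
        p ∈ g.getD q PySem.Set.empty := by
  simp only [List.nodup_cons, List.mem_cons, List.not_mem_nil, or_false,
    List.nodup_nil, and_true, not_or] at hnd
  obtain ⟨⟨hxy, hxz⟩, hyz, -⟩ := hnd
  simp only [Bool.or_eq_true, PySem.Set.contains_iff]
  constructor
  · rintro (((((h | h) | h) | h) | h) | h)
    · exact ⟨x, y, by simp, by simp, hxy, h⟩
    · exact ⟨z, y, by simp, by simp, fun hh => hyz hh.symm, h⟩
    · exact ⟨x, z, by simp, by simp, hxz, h⟩
    · exact ⟨y, z, by simp, by simp, hyz, h⟩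
    · exact ⟨y, x, by simp, by simp, fun hh => hxy hh.symm, h⟩
    · exact ⟨z, x, by simp, by simp, fun hh => hxz hh.symm, h⟩
  · rintro ⟨p, q, hp, hq, hne, hm⟩
    simp only [List.mem_cons, List.not_mem_nil, or_false] at hp hq
    rcases hp with rfl | rfl | rfl <;> rcases hq with rfl | rfl | rfl <;> tauto

theorem pvLoopA_zero_one (g : PySem.Dict Int (PySem.Set Int)) (vs : List (PySem.Set Int)) :
    pvLoopA g vs = 0 ∨ pvLoopA g vs = 1 := by
  induction vs with
  | nil => right; rfl
  | cons s rest ih =>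
    rcases s with _ | ⟨x, _ | ⟨y, _ | ⟨z, _ | ⟨w, r⟩⟩⟩⟩ <;> simp only [pvLoopA] <;>
      first
        | (left; trivial)
        | (split_ifs <;> first | (left; trivial) | exact ih)

theorem pvLoopA_eq_one_iff (g : PySem.Dict Int (PySem.Set Int)) (vs : List (PySem.Set Int))
    (h3 : ∀ s ∈ vs, s.length = 3) (hnd : ∀ s ∈ vs, s.Nodup) :
    pvLoopA g vs = 1 ↔
      ¬ ∃ s ∈ vs, ∃ p q, p ∈ s ∧ q ∈ s ∧ p ≠ q ∧ p ∈ g.getD q PySem.Set.empty := by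
  induction vs with
  | nil => simp [pvLoopA]
  | cons s rest ih =>
    have h3s : s.length = 3 := h3 s (by simp)
    obtain ⟨x, y, z, rfl⟩ : ∃ x y z, s = [x, y, z] := by
      rcases s with _ | ⟨x, _ | ⟨y, _ | ⟨z, _ | ⟨w, r⟩⟩⟩⟩ <;> simp at h3s
      exact ⟨x, y, z, rfl⟩
    have hnds : ([x, y, z] : List Int).Nodup := hnd _ (by simp)
    simp only [pvLoopA]
    split_ifs with hc
    · rw [pv_six_iff g x y z hnds] at hc
      have hbad : ∃ s ∈ ([x, y, z] : PySem.Set Int) :: rest, ∃ p q, p ∈ s ∧ q ∈ s ∧ p ≠ q ∧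
          p ∈ g.getD q PySem.Set.empty := ⟨[x, y, z], by simp, hc⟩
      constructor
      · intro h0; exact absurd h0 (by norm_num)
      · intro hf; exact absurd hbad hf
    · rw [ih (fun s hs => h3 s (by simp [hs])) (fun s hs => hnd s (by simp [hs]))]
      have hg : ¬ ∃ p q, p ∈ ([x, y, z] : List Int) ∧ q ∈ ([x, y, z] : List Int) ∧ p ≠ q ∧
          p ∈ g.getD q PySem.Set.empty := by
        rw [← pv_six_iff g x y z hnds]; simpa using hc
      constructor
      · rintro hr ⟨s, hs, hbad⟩
        rcases List.mem_cons.mp hs with rfl | hs'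
        · exact hg hbad
        · exact hr ⟨s, hs', hbad⟩
      · intro hr ⟨s, hs, hbad⟩
        exact hr ⟨s, by simp [hs], hbad⟩

theorem pv_exists_other (s : List Int) (h3 : s.length = 3) (hnd : s.Nodup) (y : Int)
    (hy : y ∈ s) : ∃ p ∈ s, p ≠ y := by
  rcases s with _ | ⟨a, _ | ⟨b, _ | ⟨c, _ | ⟨d, r⟩⟩⟩⟩ <;> simp at h3
  simp only [List.nodup_cons, List.mem_cons, List.not_mem_nil, or_false, not_or] at hnd
  by_cases hay : a = y
  · exact ⟨b, by simp, fun hby => hnd.1.1 (hay.trans hby.symm)⟩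
  · exact ⟨a, by simp, hay⟩

-- A's bad-vertex condition equals "some edge's endpoints share a neighbour"
theorem pv_bad_iff (ladder : List (List Int)) (hpre : ∀ e ∈ ladder, e.length = 2)
    (h3 : ∀ s ∈ (pvBuildG ladder).values, s.length = 3) :
    (∃ s ∈ (pvBuildG ladder).values, ∃ p q, p ∈ s ∧ q ∈ s ∧ p ≠ q ∧
        p ∈ (pvBuildG ladder).getD q PySem.Set.empty) ↔
      (∃ e ∈ ladder, ∃ x y, e = [x, y] ∧
        (∃ w, w ∈ (pvBuildG ladder).getD x PySem.Set.empty ∧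
              w ∈ (pvBuildG ladder).getD y PySem.Set.empty)) := by
  have hknd : (pvBuildG ladder).keys.Nodup :=
    pv_nodup_keys_foldl ladder _ PySem.Dict.nodup_keys_empty
  have hval : (pvBuildG ladder).values =
      (pvBuildG ladder).keys.map (fun k => (pvBuildG ladder).getD k PySem.Set.empty) :=
    PySem.Dict.values_eq_map_keys _ hknd _
  have hvnd : ∀ a, ((pvBuildG ladder).getD a PySem.Set.empty).Nodup := by
    intro a
    exact pv_nodup_foldl ladder _ (by intro a; simp [PySem.Dict.getD_empty]) a
  have hmemk : ∀ a b, b ∈ (pvBuildG ladder).getD a PySem.Set.empty →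
      a ∈ (pvBuildG ladder).keys :=
    fun a b hb => pv_mem_keys_of_ne_nil _ a (List.ne_nil_of_mem hb)
  have hlen : ∀ a b, b ∈ (pvBuildG ladder).getD a PySem.Set.empty →
      ((pvBuildG ladder).getD a PySem.Set.empty).length = 3 := by
    intro a b hb
    exact h3 _ (by rw [hval]; exact List.mem_map_of_mem (hmemk a b hb))
  have hadj := pv_adj ladder hpre
  have hsymm := pv_adj_symm ladder hpre
  constructor
  · rintro ⟨s, hs, p, q, hp, hq, hne, hpq⟩
    rw [hval] at hs
    obtain ⟨v, hv, rfl⟩ := List.mem_map.mp hs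
    have hvp : v ∈ (pvBuildG ladder).getD p PySem.Set.empty := (hsymm v p).mp hp
    have hvq : v ∈ (pvBuildG ladder).getD q PySem.Set.empty := (hsymm v q).mp hq
    rcases (hadj q p).mp hpq with hqp | hpq'
    · exact ⟨[q, p], hqp, q, p, rfl, v, hvq, hvp⟩
    · exact ⟨[p, q], hpq', p, q, rfl, v, hvp, hvq⟩
  · rintro ⟨e, he, x, y, rfl, w, hwx, hwy⟩
    have hyx : y ∈ (pvBuildG ladder).getD x PySem.Set.empty := (hadj x y).mpr (Or.inl he)
    by_cases hwyeq : w = y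
    · subst hwyeq
      have hky : w ∈ (pvBuildG ladder).keys := hmemk w w hwy
      obtain ⟨p, hp, hpne⟩ := pv_exists_other _ (hlen w w hwy) (hvnd w) w hwy
      exact ⟨(pvBuildG ladder).getD w PySem.Set.empty,
        by rw [hval]; exact List.mem_map_of_mem hky,
        w, p, hwy, hp, fun hh => hpne hh.symm, (hsymm w p).mp hp⟩
    · have hkx : x ∈ (pvBuildG ladder).keys := hmemk x y hyx
      exact ⟨(pvBuildG ladder).getD x PySem.Set.empty,
        by rw [hval]; exact List.mem_map_of_mem hkx,
        w, y, hwx, hyx, hwyeq, hwy⟩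

-- ---------- B-side: characterisation of the edge set, vertex set and degrees ----------

theorem pv_canon_eq_iff (x y a b : Int) :
    pvCanon x y = (a, b) ↔ (a ≤ b) ∧ ((x = a ∧ y = b) ∨ (x = b ∧ y = a)) := by
  unfold pvCanon
  split_ifs with h <;> constructor <;> intro hh
  · obtain ⟨rfl, rfl⟩ := Prod.mk.injEq .. ▸ hh
    exact ⟨h, Or.inl ⟨rfl, rfl⟩⟩
  · rcases hh.2 with ⟨rfl, rfl⟩ | ⟨rfl, rfl⟩
    · rfl
    · have : x = y := le_antisymm h hh.1
      subst this; rfl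
  · obtain ⟨rfl, rfl⟩ := Prod.mk.injEq .. ▸ hh
    exact ⟨le_of_lt (lt_of_not_ge h), Or.inr ⟨rfl, rfl⟩⟩
  · rcases hh.2 with ⟨rfl, rfl⟩ | ⟨rfl, rfl⟩
    · exact absurd hh.1 h
    · rfl

theorem pv_mem_edges_aux (l : List (List Int)) (es : PySem.Set (Int × Int)) (p : Int × Int) :
    p ∈ l.foldl
        (fun es e =>
          match e with
          | x :: y :: _ => PySem.Set.add es (pvCanon x y)
          | _ => es) es ↔
      p ∈ es ∨ ∃ e ∈ l, ∃ x y r, e = x :: y :: r ∧ p = pvCanon x y := by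
  induction l generalizing es with
  | nil => simp
  | cons e t ih =>
    rw [List.foldl_cons, ih]
    rcases e with _ | ⟨x, _ | ⟨y, r⟩⟩
    · simp only [List.mem_cons]
      constructor
      · rintro (h | ⟨e', he', h⟩)
        · exact Or.inl h
        · exact Or.inr ⟨e', Or.inr he', h⟩
      · rintro (h | ⟨e', he' | he', hx, hy, hr, he'', hp⟩)
        · exact Or.inl h
        · simp [he'] at he''
        · exact Or.inr ⟨e', he', hx, hy, hr, he'', hp⟩
    · simp only [List.mem_cons]
      constructor
      · rintro (h | ⟨e', he', h⟩)
        · exact Or.inl h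
        · exact Or.inr ⟨e', Or.inr he', h⟩
      · rintro (h | ⟨e', he' | he', hx, hy, hr, he'', hp⟩)
        · exact Or.inl h
        · simp [he'] at he''
        · exact Or.inr ⟨e', he', hx, hy, hr, he'', hp⟩
    · rw [PySem.Set.mem_add]
      simp only [List.mem_cons]
      constructor
      · rintro ((h | h) | ⟨e', he', h⟩)
        · exact Or.inl h
        · exact Or.inr ⟨x :: y :: r, Or.inl rfl, x, y, r, rfl, h⟩
        · exact Or.inr ⟨e', Or.inr he', h⟩
      · rintro (h | ⟨e', he' | he', x', y', r', he'', hp⟩)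
        · exact Or.inl (Or.inl h)
        · subst he'
          obtain ⟨rfl, rfl, rfl⟩ : x' = x ∧ y' = y ∧ r' = r := by
            simpa using he''.symm
          exact Or.inl (Or.inr hp)
        · exact Or.inr ⟨e', he', x', y', r', he'', hp⟩

theorem pv_mem_edges (ladder : List (List Int)) (hpre : ∀ e ∈ ladder, e.length = 2)
    (p : Int × Int) :
    p ∈ pvEdges ladder ↔
      p.1 ≤ p.2 ∧ p.2 ∈ (pvBuildG ladder).getD p.1 PySem.Set.empty := by
  unfold pvEdges
  rw [pv_mem_edges_aux, pv_adj ladder hpre,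
    show p ∈ (PySem.Set.empty : PySem.Set (Int × Int)) ↔ False from
      Iff.intro (fun h => absurd h List.not_mem_nil) False.elim, false_or]
  constructor
  · rintro ⟨e, he, x, y, r, rfl, rfl⟩
    have h2 := hpre _ he
    simp only [List.length_cons] at h2
    have hr : r = [] := List.eq_nil_of_length_eq_zero (by omega)
    subst hr
    unfold pvCanon
    split_ifs with h
    · exact ⟨h, Or.inl he⟩
    · exact ⟨le_of_lt (lt_of_not_ge h), Or.inr he⟩
  · rintro ⟨hle, hladder⟩
    obtain ⟨a, b⟩ := p
    simp only at hle hladder ⊢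
    rcases hladder with hab | hba
    · exact ⟨[a, b], hab, a, b, [], rfl, ((pv_canon_eq_iff a b a b).mpr ⟨hle, Or.inl ⟨rfl, rfl⟩⟩).symm⟩
    · exact ⟨[b, a], hba, b, a, [], rfl, ((pv_canon_eq_iff b a a b).mpr ⟨hle, Or.inr ⟨rfl, rfl⟩⟩).symm⟩

theorem pv_nodup_edges (ladder : List (List Int)) : (pvEdges ladder).Nodup := by
  unfold pvEdges
  generalize hs : (PySem.Set.empty : PySem.Set (Int × Int)) = es
  have hnd : es.Nodup := hs ▸ List.nodup_nil
  clear hs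
  induction ladder generalizing es with
  | nil => exact hnd
  | cons e t ih =>
    rw [List.foldl_cons]
    rcases e with _ | ⟨x, _ | ⟨y, r⟩⟩
    · exact ih es hnd
    · exact ih es hnd
    · exact ih _ (PySem.Set.nodup_add _ _ hnd)

theorem pv_canon_mem_edges (ladder : List (List Int)) (hpre : ∀ e ∈ ladder, e.length = 2)
    (a c : Int) :
    pvCanon a c ∈ pvEdges ladder ↔ c ∈ (pvBuildG ladder).getD a PySem.Set.empty := by
  rw [pv_mem_edges ladder hpre]
  unfold pvCanon
  split_ifs with h
  · simp only
    exact and_iff_right h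
  · simp only
    rw [pv_adj_symm ladder hpre]
    exact and_iff_right (le_of_lt (lt_of_not_ge h))

theorem pv_mem_verts_aux (es : List (Int × Int)) (vs : PySem.Set Int) (v : Int) :
    v ∈ es.foldl (fun vs e => PySem.Set.add (PySem.Set.add vs e.1) e.2) vs ↔
      v ∈ vs ∨ ∃ e ∈ es, v = e.1 ∨ v = e.2 := by
  induction es generalizing vs with
  | nil => simp
  | cons e t ih =>
    rw [List.foldl_cons, ih, PySem.Set.mem_add, PySem.Set.mem_add]
    simp only [List.mem_cons]
    constructor
    · rintro (((h | h) | h) | ⟨e', he', h⟩)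
      · exact Or.inl h
      · exact Or.inr ⟨e, Or.inl rfl, Or.inl h⟩
      · exact Or.inr ⟨e, Or.inl rfl, Or.inr h⟩
      · exact Or.inr ⟨e', Or.inr he', h⟩
    · rintro (h | ⟨e', he' | he', h⟩)
      · exact Or.inl (Or.inl (Or.inl h))
      · subst he'
        rcases h with h | h
        · exact Or.inl (Or.inl (Or.inr h))
        · exact Or.inl (Or.inr h)
      · exact Or.inr ⟨e', he', h⟩

theorem pv_mem_verts (edges : PySem.Set (Int × Int)) (v : Int) :
    v ∈ pvVerts edges ↔ ∃ e ∈ edges, v = e.1 ∨ v = e.2 := by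
  unfold pvVerts
  rw [pv_mem_verts_aux]
  constructor
  · rintro (h | h)
    · exact absurd h List.not_mem_nil
    · exact h
  · exact Or.inr

theorem pv_nodup_verts (edges : PySem.Set (Int × Int)) : (pvVerts edges).Nodup := by
  unfold pvVerts
  generalize hs : (PySem.Set.empty : PySem.Set Int) = vs
  have hnd : vs.Nodup := hs ▸ List.nodup_nil
  clear hs
  induction edges generalizing vs with
  | nil => exact hnd
  | cons e t ih =>
    exact ih _ (PySem.Set.nodup_add _ _ (PySem.Set.nodup_add _ _ hnd))

theorem pv_verts_iff_keys (ladder : List (List Int)) (hpre : ∀ e ∈ ladder, e.length = 2)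
    (v : Int) : v ∈ pvVerts (pvEdges ladder) ↔ v ∈ (pvBuildG ladder).keys := by
  rw [pv_mem_verts]
  constructor
  · rintro ⟨e, he, hv⟩
    rw [pv_mem_edges ladder hpre] at he
    apply pv_mem_keys_of_ne_nil
    rcases hv with rfl | rfl
    · exact List.ne_nil_of_mem he.2
    · exact List.ne_nil_of_mem ((pv_adj_symm ladder hpre _ _).mp he.2)
  · intro hk
    have hne : (pvBuildG ladder).getD v PySem.Set.empty ≠ [] :=
      pv_getD_ne_nil_of_mem_keys ladder PySem.Dict.empty (by simp [PySem.Dict.keys_empty]) v hk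
    obtain ⟨w, hw⟩ := List.exists_mem_of_ne_nil _ hne
    refine ⟨pvCanon v w, (pv_canon_mem_edges ladder hpre v w).mpr hw, ?_⟩
    unfold pvCanon
    split_ifs <;> simp

theorem pv_deg_eq (ladder : List (List Int)) (hpre : ∀ e ∈ ladder, e.length = 2) (v : Int) :
    pvDeg (pvEdges ladder) v = (((pvBuildG ladder).getD v PySem.Set.empty).length : Int) := by
  unfold pvDeg
  have hcount : (pvEdges ladder).foldl
      (fun acc e => if e.1 = v ∨ e.2 = v then acc + 1 else acc) 0 =
      (0 : Int) + ((pvEdges ladder).countP (fun e => decide (e.1 = v ∨ e.2 = v)) : Int) := by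
    rw [← PySem.List.foldl_count_if (fun e => decide (e.1 = v ∨ e.2 = v)) (pvEdges ladder) 0]
    simp
  rw [hcount, zero_add]
  congr 1
  rw [show ((pvEdges ladder).countP (fun e => decide (e.1 = v ∨ e.2 = v))) =
      ((pvEdges ladder).filter (fun e => decide (e.1 = v ∨ e.2 = v))).length from
    List.countP_eq_length_filter]
  have hperm : ((pvEdges ladder).filter (fun e => decide (e.1 = v ∨ e.2 = v))).Perm
      (((pvBuildG ladder).getD v PySem.Set.empty).map (fun w => pvCanon v w)) := by
    apply (List.perm_ext_iff_of_nodup ?_ ?_).mpr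
    · intro p
      rw [List.mem_filter, pv_mem_edges ladder hpre, List.mem_map]
      simp only [decide_eq_true_eq]
      constructor
      · rintro ⟨⟨hle, hmem⟩, hv | hv⟩
        · refine ⟨p.2, ?_, ?_⟩
          · rw [← hv]; exact hmem
          · unfold pvCanon
            rw [if_pos (hv ▸ hle)]
            exact Prod.ext hv.symm rfl
        · refine ⟨p.1, ?_, ?_⟩
          · rw [← hv]; exact (pv_adj_symm ladder hpre _ _).mp hmem
          · unfold pvCanon
            split_ifs with hvp
            · exact Prod.ext (by omega) (by omega)
            · exact Prod.ext rfl hv.symm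
      · rintro ⟨w, hw, rfl⟩
        have hmem := (pv_canon_mem_edges ladder hpre v w).mpr hw
        rw [pv_mem_edges ladder hpre] at hmem
        refine ⟨hmem, ?_⟩
        unfold pvCanon
        split_ifs <;> simp
    · exact List.Nodup.filter _ (pv_nodup_edges ladder)
    · refine List.Nodup.map ?_ (pv_nodup_foldl ladder _ (by simp [PySem.Dict.getD_empty]) v)
      intro w1 w2 hw
      simp only [pvCanon] at hw
      split_ifs at hw <;> (simp only [Prod.mk.injEq] at hw; omega)
  rw [hperm.length_eq, List.length_map]

theorem pvLoopB_zero_one (edges : PySem.Set (Int × Int)) (verts : PySem.Set Int)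
    (es : List (Int × Int)) : pvLoopB edges verts es = 0 ∨ pvLoopB edges verts es = 1 := by
  induction es with
  | nil => right; rfl
  | cons e rest ih =>
    obtain ⟨a, b⟩ := e
    simp only [pvLoopB]
    split_ifs
    · left; rfl
    · exact ih

theorem pvLoopB_eq_one_iff (edges : PySem.Set (Int × Int)) (verts : PySem.Set Int)
    (es : List (Int × Int)) :
    pvLoopB edges verts es = 1 ↔
      ¬ ∃ e ∈ es, ∃ c ∈ verts, pvCanon e.1 c ∈ edges ∧ pvCanon e.2 c ∈ edges := by
  induction es with
  | nil => simp [pvLoopB]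
  | cons e rest ih =>
    obtain ⟨a, b⟩ := e
    simp only [pvLoopB]
    split_ifs with hc
    · rw [List.any_eq_true] at hc
      obtain ⟨c, hcv, hcc⟩ := hc
      rw [Bool.and_eq_true, PySem.Set.contains_iff, PySem.Set.contains_iff] at hcc
      constructor
      · intro h0; exact absurd h0 (by norm_num)
      · intro hf; exact absurd ⟨(a, b), by simp, c, hcv, hcc.1, hcc.2⟩ hf
    · rw [ih]
      have hg : ¬ ∃ c ∈ verts, pvCanon a c ∈ edges ∧ pvCanon b c ∈ edges := by
        rintro ⟨c, hcv, h1, h2⟩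
        exact hc (List.any_eq_true.mpr ⟨c, hcv, by
          rw [Bool.and_eq_true, PySem.Set.contains_iff, PySem.Set.contains_iff]
          exact ⟨h1, h2⟩⟩)
      constructor
      · rintro hr ⟨e, he, c, hcv, h1, h2⟩
        rcases List.mem_cons.mp he with rfl | he'
        · exact hg ⟨c, hcv, h1, h2⟩
        · exact hr ⟨e, he', c, hcv, h1, h2⟩
      · intro hr ⟨e, he, hrest⟩
        exact hr ⟨e, by simp [he], hrest⟩

-- the two triangle tests find the same thing
theorem pv_bad_B_iff (ladder : List (List Int)) (hpre : ∀ e ∈ ladder, e.length = 2) :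
    (∃ e ∈ pvEdges ladder, ∃ c ∈ pvVerts (pvEdges ladder),
        pvCanon e.1 c ∈ pvEdges ladder ∧ pvCanon e.2 c ∈ pvEdges ladder) ↔
      (∃ e ∈ ladder, ∃ x y, e = [x, y] ∧
        (∃ w, w ∈ (pvBuildG ladder).getD x PySem.Set.empty ∧
              w ∈ (pvBuildG ladder).getD y PySem.Set.empty)) := by
  constructor
  · rintro ⟨e, he, c, hcv, h1, h2⟩
    rw [pv_canon_mem_edges ladder hpre] at h1 h2
    rw [pv_mem_edges ladder hpre] at he
    rcases (pv_adj ladder hpre e.1 e.2).mp he.2 with h12 | h21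
    · exact ⟨[e.1, e.2], h12, e.1, e.2, rfl, c, h1, h2⟩
    · exact ⟨[e.2, e.1], h21, e.2, e.1, rfl, c, h2, h1⟩
  · rintro ⟨e, he, x, y, rfl, w, hwx, hwy⟩
    have hyx : y ∈ (pvBuildG ladder).getD x PySem.Set.empty := (pv_adj ladder hpre x y).mpr (Or.inl he)
    have hme : pvCanon x y ∈ pvEdges ladder := (pv_canon_mem_edges ladder hpre x y).mpr hyx
    have hwv : w ∈ pvVerts (pvEdges ladder) := by
      apply (pv_verts_iff_keys ladder hpre w).mpr
      exact pv_mem_keys_of_ne_nil _ w (List.ne_nil_of_mem ((pv_adj_symm ladder hpre x w).mp hwx))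
    by_cases hxy : x ≤ y
    · refine ⟨pvCanon x y, hme, w, hwv, ?_⟩
      rw [show pvCanon x y = (x, y) by unfold pvCanon; rw [if_pos hxy]]
      exact ⟨(pv_canon_mem_edges ladder hpre x w).mpr hwx,
             (pv_canon_mem_edges ladder hpre y w).mpr hwy⟩
    · refine ⟨pvCanon x y, hme, w, hwv, ?_⟩
      rw [show pvCanon x y = (y, x) by unfold pvCanon; rw [if_neg hxy]]
      exact ⟨(pv_canon_mem_edges ladder hpre y w).mpr hwy,
             (pv_canon_mem_edges ladder hpre x w).mpr hwx⟩

-- the two guards agree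
theorem pv_guard_iff (n : Int) (ladder : List (List Int)) (hpre : ∀ e ∈ ladder, e.length = 2) :
    ((!((pvBuildG ladder).values.all fun s => PySem.Set.len s == 3)) ||
        decide (((pvBuildG ladder).size : Int) ≠ n)) =
      (decide ((PySem.Set.len (pvVerts (pvEdges ladder)) : Int) ≠ n) ||
        (pvVerts (pvEdges ladder)).any (fun v => decide (pvDeg (pvEdges ladder) v ≠ 3))) := by
  have hbool : ∀ (a b : Bool), (a = true ↔ b = true) → a = b := by decide
  have hknd : (pvBuildG ladder).keys.Nodup :=
    pv_nodup_keys_foldl ladder _ PySem.Dict.nodup_keys_empty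
  have hperm : (pvVerts (pvEdges ladder)).Perm (pvBuildG ladder).keys :=
    (List.perm_ext_iff_of_nodup (pv_nodup_verts _) hknd).mpr (pv_verts_iff_keys ladder hpre)
  have hsize : PySem.Set.len (pvVerts (pvEdges ladder)) = ((pvBuildG ladder).size : Int) := by
    simp only [PySem.Set.len, PySem.Dict.size, PySem.Dict.keys] at *
    rw [hperm.length_eq, List.length_map]
  have hdeg : ∀ v, pvDeg (pvEdges ladder) v =
      PySem.Set.len ((pvBuildG ladder).getD v PySem.Set.empty) := by
    intro v
    rw [pv_deg_eq ladder hpre v]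
    simp [PySem.Set.len]
  apply hbool
  simp only [Bool.or_eq_true, Bool.not_eq_true', decide_eq_true_eq, List.any_eq_true,
    List.all_eq_false, PySem.Dict.values_eq_map_keys _ hknd PySem.Set.empty, List.mem_map]
  constructor
  · rintro (⟨s, ⟨k, hk, rfl⟩, hk3⟩ | hsz)
    · right
      refine ⟨k, (pv_verts_iff_keys ladder hpre k).mpr hk, ?_⟩
      rw [hdeg k]
      simpa using hk3
    · left
      rw [hsize]
      exact hsz
  · rintro (hsz | ⟨v, hv, hv3⟩)
    · right
      rw [← hsize]
      exact hsz
    · left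
      refine ⟨(pvBuildG ladder).getD v PySem.Set.empty,
        ⟨v, (pv_verts_iff_keys ladder hpre v).mp hv, rfl⟩, ?_⟩
      rw [hdeg v] at hv3
      simpa using hv3

-- ===== VERDICT (by name: the statement is the Claim_ definition above) =====
theorem isMobiusLadder_spec : Claim_equal_isMobiusLadder := by
  intro n ladder hdom hpre
  unfold Spec_isMobiusLadder isMobiusLadder isMobiusLadder_alt
  show (if ((!((pvBuildG ladder).values.all fun s => PySem.Set.len s == 3)) ||
            decide (((pvBuildG ladder).size : Int) ≠ n)) = true then (0 : Int)
        else if n = 4 then 1 else pvLoopA (pvBuildG ladder) (pvBuildG ladder).values) =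
       (if (decide (PySem.Set.len (pvVerts (pvEdges ladder)) ≠ n) ||
            (pvVerts (pvEdges ladder)).any (fun v => decide (pvDeg (pvEdges ladder) v ≠ 3))) = true
        then (0 : Int)
        else if n = 4 then 1 else pvLoopB (pvEdges ladder) (pvVerts (pvEdges ladder)) (pvEdges ladder))
  rw [← pv_guard_iff n ladder hpre]
  split_ifs with hguard hn4
  · rfl
  · rfl
  · have h3 : ∀ s ∈ (pvBuildG ladder).values, s.length = 3 := by
      intro s hs
      have hx : ((pvBuildG ladder).values.all fun s => PySem.Set.len s == 3) = true := by
        cases hb : ((pvBuildG ladder).values.all fun s => PySem.Set.len s == 3) with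
        | false => exact absurd (by simp only [hb, Bool.not_false, Bool.true_or]) hguard
        | true => rfl
      have h2 := List.all_eq_true.mp hx s hs
      have h4 : (s.length : Int) = 3 := by simpa [PySem.Set.len] using h2
      exact_mod_cast h4
    have hknd : (pvBuildG ladder).keys.Nodup :=
      pv_nodup_keys_foldl ladder _ PySem.Dict.nodup_keys_empty
    have hndv : ∀ s ∈ (pvBuildG ladder).values, s.Nodup := by
      intro s hs
      rw [PySem.Dict.values_eq_map_keys _ hknd PySem.Set.empty] at hs
      obtain ⟨v, hv, rfl⟩ := List.mem_map.mp hs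
      exact pv_nodup_foldl ladder _ (by intro a; simp [PySem.Dict.getD_empty]) v
    have hiff : pvLoopA (pvBuildG ladder) (pvBuildG ladder).values = 1 ↔
        pvLoopB (pvEdges ladder) (pvVerts (pvEdges ladder)) (pvEdges ladder) = 1 := by
      rw [pvLoopA_eq_one_iff _ _ h3 hndv, pvLoopB_eq_one_iff]
      exact not_congr ((pv_bad_iff ladder hpre h3).trans (pv_bad_B_iff ladder hpre).symm)
    rcases pvLoopA_zero_one (pvBuildG ladder) (pvBuildG ladder).values with hA | hA
    · rcases pvLoopB_zero_one (pvEdges ladder) (pvVerts (pvEdges ladder)) (pvEdges ladder) with hB | hB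
      · rw [hA, hB]
      · exact absurd (hiff.mpr hB) (by rw [hA]; norm_num)
    · rw [hA, hiff.mp hA]
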